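-- pv_equiv track=rewrite | github.com/AyatukiRin/Algorithm | Luogu/P1019/HaoWang.py | collide_checker
-- ===== SOURCE A (Python) =====
-- def collide_checker(str1: str, str2: str) -> int:
--     l1 = len(str1)
--     l2 = len(str2)
--
--     for i in range(1, min(l1, l2)):
--         found: bool = True
--         for j in range(i):
--             if str1[l1 - i + j] != str2[j]:
--                 found = False
--                 break
--         if found:
--             return i
--     return 0
-- ===== SOURCE B (Python) =====
-- def collide_checker(str1: str, str2: str) -> int:
--     l1 = len(str1)
--     l2 = len(str2)
--     if l1 == 0 or l2 == 0:
--         return 0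
--     # KMP prefix function of str2 + sep + str1: every suffix-of-str1 /
--     # prefix-of-str2 overlap of length < min(l1, l2) is a border of t,
--     # and all borders of t form the chain pi[n-1], pi[pi[n-1]-1], ...
--     t = str2 + "\x00" + str1
--     n = len(t)
--     pi = [0] * n
--     k = 0
--     for q in range(1, n):
--         while k and t[q] != t[k]:
--             k = pi[k - 1]
--         if t[q] == t[k]:
--             k += 1
--         pi[q] = k
--     m = min(l1, l2)
--     ans = 0
--     k = pi[n - 1]
--     while k:
--         if k < m:
--             ans = k
--         k = pi[k - 1]
--     return ans
-- ===== Notes on version B (the rewrite author's own statement) =====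
-- stated objective: alternative
-- what changed: Replaces A's nested try-every-overlap-length character loops by the KMP prefix function of str2+'\x00'+str1: the border chain pi[n-1], pi[pi[n-1]-1], ... enumerates all suffix/prefix overlaps at once, and B returns the smallest chain element below min(l1,l2).
import Mathlib
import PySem

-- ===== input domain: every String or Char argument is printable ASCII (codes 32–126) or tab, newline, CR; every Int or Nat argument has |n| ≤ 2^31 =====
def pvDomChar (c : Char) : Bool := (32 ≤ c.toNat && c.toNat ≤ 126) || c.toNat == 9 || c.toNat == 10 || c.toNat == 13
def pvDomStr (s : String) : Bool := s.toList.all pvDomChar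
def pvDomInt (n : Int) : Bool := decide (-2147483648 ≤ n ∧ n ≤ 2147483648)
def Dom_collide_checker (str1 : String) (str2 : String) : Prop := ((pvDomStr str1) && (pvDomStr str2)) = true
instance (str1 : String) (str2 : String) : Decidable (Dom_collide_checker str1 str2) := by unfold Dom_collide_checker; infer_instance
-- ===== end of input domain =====

-- B replaces A's nested try-every-overlap-length loops by the KMP prefix function of
-- str2 ++ '\x00' ++ str1: the border chain pi[n-1], pi[pi[n-1]-1], ... enumerates every
-- suffix-of-str1/prefix-of-str2 overlap, and B keeps the smallest one below min(l1,l2)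
-- (objective: alternative, linear-time algorithm).

-- ===== PORT A =====
-- inner 'for j in range(i)' with the found flag and break
def aInner (str1 : String) (str2 : String) (l1 : Int) (i : Int) : List Int → Bool
  | [] => true
  | j :: js =>
    if PySem.Str.pyGet? str1 (l1 - i + j) ≠ PySem.Str.pyGet? str2 j then false
    else aInner str1 str2 l1 i js

-- outer 'for i in range(1, min(l1, l2))' with the early return
def aOuter (str1 : String) (str2 : String) (l1 : Int) : List Int → Int
  | [] => 0
  | i :: is =>
    if aInner str1 str2 l1 i (PySem.List.pyRange 0 i 1) then i
    else aOuter str1 str2 l1 is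

def collide_checker (str1 : String) (str2 : String) : Int :=
  let l1 := PySem.Str.len str1
  let l2 := PySem.Str.len str2
  aOuter str1 str2 l1 (PySem.List.pyRange 1 (min l1 l2) 1)

-- ===== PORT B =====
-- 'while k and t[q] != t[k]: k = pi[k-1]' — fuel = starting k bounds the iterations,
-- since every step strictly decreases k (pi[k-1] = longest proper border of t[:k] < k);
-- indices are always in range in B's Python, so getD's default is never read.
def kmpFall (t : List Char) (pi : List Nat) (cq : Char) : Nat → Nat → Nat
  | 0, k => k
  | fuel+1, k =>
    if k ≠ 0 ∧ t.getD k (Char.ofNat 0) ≠ cq then kmpFall t pi cq fuel (pi.getD (k-1) 0)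
    else k

-- one iteration of 'for q in range(1, n)' on the state (pi, k)
def kmpStep (t : List Char) (s : List Nat × Nat) (q : Nat) : List Nat × Nat :=
  let k1 := kmpFall t s.1 (t.getD q (Char.ofNat 0)) s.2 s.2
  let k2 := if t.getD q (Char.ofNat 0) = t.getD k1 (Char.ofNat 0) then k1 + 1 else k1
  (s.1 ++ [k2], k2)

-- 'pi = [0]*n' then the prefix-function loop; pi grows by one entry per q
def buildPi (t : List Char) : List Nat :=
  ((List.range' 1 (t.length - 1)).foldl (kmpStep t) ([0], 0)).1

-- 'while k: if k < m: ans = k; k = pi[k-1]' — fuel = starting k again bounds the loop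
def chainLoop (pi : List Nat) (mn : Nat) : Nat → Nat → Nat → Nat
  | 0, _, ans => ans
  | fuel+1, k, ans =>
    if k ≠ 0 then chainLoop pi mn fuel (pi.getD (k-1) 0) (if k < mn then k else ans)
    else ans

def collide_checker_alt (str1 : String) (str2 : String) : Int :=
  let l1 := PySem.Str.len str1
  let l2 := PySem.Str.len str2
  if l1 = 0 ∨ l2 = 0 then 0
  else
    let t := str2.toList ++ Char.ofNat 0 :: str1.toList
    let pi := buildPi t
    let k0 := pi.getD (t.length - 1) 0
    ((chainLoop pi (min str1.toList.length str2.toList.length) k0 k0 0 : Nat) : Int)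

-- ===== PRECONDITION & SPEC =====
def Spec_collide_checker (str1 : String) (str2 : String) (out : Int) : Prop := out = collide_checker_alt str1 str2
instance (str1 : String) (str2 : String) (out : Int) : Decidable (Spec_collide_checker str1 str2 out) := by unfold Spec_collide_checker; infer_instance

-- ===== CLAIM (what is proved, stated in full; the proofs are below) =====
def Claim_equal_collide_checker : Prop := ∀ (str1 : String) (str2 : String), Dom_collide_checker str1 str2 → Spec_collide_checker str1 str2 (collide_checker str1 str2)

-- ===== LEMMAS AND PROOFS =====

-- ---- proof-side description of the common result ----
-- pvLo: smallest admissible start position of the overlapping suffix of str1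
def pvLo (str1 str2 : String) : ℕ :=
  str1.toList.length - min str1.toList.length str2.toList.length + 1
-- pvQ: q is an admissible start position whose suffix of str1 is a prefix of str2
def pvQ (str1 str2 : String) (q : ℕ) : Prop :=
  pvLo str1 str2 ≤ q ∧ q < str1.toList.length ∧ str1.toList.drop q <+: str2.toList
@[reducible] def pvQdec (str1 str2 : String) : DecidablePred (pvQ str1 str2) := fun _ => by
  unfold pvQ; infer_instance
def pvG (str1 str2 : String) : ℕ :=
  letI := pvQdec str1 str2
  Nat.findGreatest (pvQ str1 str2) (str1.toList.length - 1)
def pvTarget (str1 str2 : String) : Int :=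
  letI := pvQdec str1 str2
  if pvQ str1 str2 (pvG str1 str2) then (str1.toList.length : Int) - (pvG str1 str2 : Int) else 0

theorem pvTarget_of_none {str1 str2 : String} (h : ∀ q, ¬ pvQ str1 str2 q) :
    pvTarget str1 str2 = 0 := by
  letI := pvQdec str1 str2
  unfold pvTarget
  rw [if_neg (h _)]

theorem pvTarget_of_max {str1 str2 : String} (q : ℕ) (hq : pvQ str1 str2 q)
    (hmax : ∀ q', q < q' → ¬ pvQ str1 str2 q') :
    pvTarget str1 str2 = (str1.toList.length : Int) - (q : Int) := by
  letI := pvQdec str1 str2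
  have hle : q ≤ str1.toList.length - 1 := by
    have := hq.2.1; omega
  have h1 : q ≤ pvG str1 str2 := Nat.le_findGreatest hle hq
  have h2 : pvG str1 str2 ≤ q := by
    by_contra hgt
    exact hmax (pvG str1 str2) (by omega) (Nat.findGreatest_spec hle hq)
  have : pvG str1 str2 = q := le_antisymm h2 h1
  unfold pvTarget
  rw [this, if_pos hq]

-- ---- A-side: the inner loop tests exactly the overlap property ----
theorem aInner_iff (str1 str2 : String) (i j : ℕ) (hi1 : i ≤ str1.toList.length) :
    (aInner str1 str2 (PySem.Str.len str1) (i : Int) (PySem.List.pyRange (j : Int) (i : Int) 1) = true)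
      ↔ ∀ k : ℕ, j ≤ k → k < i → str1.toList[str1.toList.length - i + k]? = str2.toList[k]? := by
  by_cases hj : j < i
  · rw [PySem.List.pyRange_one_cons (by omega : (j:Int) < (i:Int))]
    rw [show ((j:Int) + 1) = ((j+1 : ℕ) : Int) by push_cast; ring]
    have hcast : PySem.Str.len str1 - (i:Int) + (j:Int) = ((str1.toList.length - i + j : ℕ) : Int) := by
      rw [PySem.Str.len_eq]; omega
    have ih := aInner_iff str1 str2 i (j+1) hi1
    simp only [aInner]
    rw [hcast, PySem.Str.pyGet?_natCast, PySem.Str.pyGet?_natCast]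
    by_cases hc : str1.toList[str1.toList.length - i + j]? = str2.toList[j]?
    · rw [if_neg (not_not_intro hc)]
      rw [ih]
      constructor
      · intro h k h1 h2
        rcases Nat.eq_or_lt_of_le h1 with he | hlt
        · rw [← he]; exact hc
        · exact h k hlt h2
      · intro h k h1 h2
        exact h k (by omega) h2
    · rw [if_pos hc]
      simp only [Bool.false_eq_true, false_iff]
      intro h
      exact hc (h j (le_refl j) hj)
  · rw [PySem.List.pyRange_one_eq_nil (by omega : (i:Int) ≤ (j:Int))]
    simp only [aInner, true_iff]
    intro k h1 h2
    omega
termination_by i - j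

-- the elementwise test is the prefix property
theorem aPrefix_iff (s1 s2 : List Char) (i : ℕ) (hi1 : i ≤ s1.length) (hi2 : i ≤ s2.length) :
    (∀ k : ℕ, 0 ≤ k → k < i → s1[s1.length - i + k]? = s2[k]?) ↔ s1.drop (s1.length - i) <+: s2 := by
  rw [List.prefix_iff_getElem?]
  have hlen : (s1.drop (s1.length - i)).length = i := by simp; omega
  constructor
  · intro h m hm
    rw [hlen] at hm
    have h1 := h m (by omega) hm
    rw [List.getElem_drop, ← List.getElem?_eq_getElem (by omega : s1.length - i + m < s1.length)]
    exact h1.symm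
  · intro h k _ hk
    have h1 := h k (by rw [hlen]; exact hk)
    rw [List.getElem_drop, ← List.getElem?_eq_getElem (by omega : s1.length - i + k < s1.length)] at h1
    exact h1.symm

-- pvQ restated through the loop index i = l1 - q
theorem pvQ_iff_i (str1 str2 : String) (i : ℕ) (h1 : 1 ≤ i)
    (h2 : i < min str1.toList.length str2.toList.length) :
    pvQ str1 str2 (str1.toList.length - i)
      ↔ str1.toList.drop (str1.toList.length - i) <+: str2.toList := by
  unfold pvQ pvLo
  constructor
  · exact fun h => h.2.2
  · intro h
    exact ⟨by omega, by omega, h⟩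

-- the outer loop returns l1 - (greatest admissible q), i.e. the least admissible i
theorem aOuter_eq (str1 str2 : String) (i0 : ℕ) (h1 : 1 ≤ i0)
    (hno : ∀ i', 1 ≤ i' → i' < i0 → ¬ pvQ str1 str2 (str1.toList.length - i')) :
    aOuter str1 str2 (PySem.Str.len str1)
        (PySem.List.pyRange (i0 : Int) ((min str1.toList.length str2.toList.length : ℕ) : Int) 1)
      = pvTarget str1 str2 := by
  by_cases hj : i0 < min str1.toList.length str2.toList.length
  · rw [PySem.List.pyRange_one_cons (by omega)]
    simp only [aOuter]
    have hinner := aInner_iff str1 str2 i0 0 (by omega)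
    rw [show ((0:ℕ):Int) = (0:Int) from rfl] at hinner
    by_cases hc : str1.toList.drop (str1.toList.length - i0) <+: str2.toList
    · rw [if_pos (hinner.mpr (fun k _ hk =>
        (aPrefix_iff str1.toList str2.toList i0 (by omega) (by omega)).mpr hc k (by omega) hk))]
      have hq : pvQ str1 str2 (str1.toList.length - i0) := (pvQ_iff_i str1 str2 i0 h1 hj).mpr hc
      rw [pvTarget_of_max (str1.toList.length - i0) hq ?_]
      · omega
      · intro q' hgt hq'
        have hlti : str1.toList.length - q' < i0 := by omega
        have h1i : 1 ≤ str1.toList.length - q' := by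
          have := hq'.2.1; omega
        have : str1.toList.length - (str1.toList.length - q') = q' := by
          have := hq'.2.1; omega
        exact hno _ h1i hlti (by rw [this]; exact hq')
    · rw [if_neg ?_]
      · rw [show ((i0 : Int) + 1) = ((i0 + 1 : ℕ) : Int) by push_cast; ring]
        exact aOuter_eq str1 str2 (i0+1) (by omega) (fun i' hi1 hi2 => by
          rcases Nat.lt_or_ge i' i0 with hlt | hge
          · exact hno i' hi1 hlt
          · have : i' = i0 := by omega
            rw [this]
            intro hq
            exact hc ((pvQ_iff_i str1 str2 i0 h1 hj).mp hq))
      · intro habs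
        exact hc ((aPrefix_iff str1.toList str2.toList i0 (by omega) (by omega)).mp
          (fun k hk1 hk2 => hinner.mp habs k (by omega) hk2))
  · rw [PySem.List.pyRange_one_eq_nil (by omega)]
    simp only [aOuter]
    rw [pvTarget_of_none ?_]
    intro q hq
    have hb1 := hq.1
    have hb2 := hq.2.1
    unfold pvLo at hb1
    have h1i : 1 ≤ str1.toList.length - q := by omega
    have hlti : str1.toList.length - q < i0 := by omega
    have hqq : str1.toList.length - (str1.toList.length - q) = q := by omega
    exact hno _ h1i hlti (by rw [hqq]; exact hq)
termination_by min str1.toList.length str2.toList.length - i0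
decreasing_by omega

-- A computes pvTarget
theorem a_eq_target (str1 str2 : String) : collide_checker str1 str2 = pvTarget str1 str2 := by
  unfold collide_checker
  simp only []
  rw [PySem.Str.len_eq, PySem.Str.len_eq]
  rw [show (min ((str1.toList.length : Int)) ((str2.toList.length : Int)))
        = ((min str1.toList.length str2.toList.length : ℕ) : Int) by push_cast; omega]
  rw [show (1:Int) = ((1:ℕ):Int) from rfl, ← PySem.Str.len_eq]
  exact aOuter_eq str1 str2 1 (le_refl 1) (fun i' h1 h2 => by omega)

-- ---- B-side: borders and the prefix function ----
-- k is a (proper) border of the prefix of t of length m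
def pvBord (t : List Char) (m k : ℕ) : Prop := k < m ∧ t.take k <:+ t.take m
@[reducible] def pvBordDec (t : List Char) (m : ℕ) : DecidablePred (pvBord t m) := fun _ => by
  unfold pvBord; infer_instance
-- the prefix function: longest proper border of t[:m]
def pvPi (t : List Char) (m : ℕ) : ℕ :=
  letI := pvBordDec t m
  Nat.findGreatest (pvBord t m) (m-1)

theorem pvBord_zero (t : List Char) {m : ℕ} (hm : 1 ≤ m) : pvBord t m 0 :=
  ⟨hm, by simpa using List.nil_suffix⟩

theorem pvPi_bord (t : List Char) {m : ℕ} (hm : 1 ≤ m) : pvBord t m (pvPi t m) := by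
  letI := pvBordDec t m
  exact Nat.findGreatest_spec (Nat.zero_le _) (pvBord_zero t hm)

theorem le_pvPi (t : List Char) {m k : ℕ} (h : pvBord t m k) : k ≤ pvPi t m := by
  letI := pvBordDec t m
  exact Nat.le_findGreatest (by have := h.1; omega) h

theorem pvPi_lt (t : List Char) {m : ℕ} (hm : 1 ≤ m) : pvPi t m < m :=
  (pvPi_bord t hm).1

theorem suffix_of_suffix_le {x y z : List Char} (hx : x <:+ z) (hy : y <:+ z)
    (hl : x.length ≤ y.length) : x <:+ y := by
  have hyz : y.length ≤ z.length := hy.length_le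
  have hxe := List.suffix_iff_eq_drop.mp hx
  have hye := List.suffix_iff_eq_drop.mp hy
  rw [List.suffix_iff_eq_drop, hye]
  simp only [List.drop_drop, List.length_drop]
  convert hxe using 2
  omega

theorem pvBord_trans {t : List Char} {m k b : ℕ} (h1 : pvBord t m k) (h2 : pvBord t k b) :
    pvBord t m b :=
  ⟨by have := h1.1; have := h2.1; omega, h2.2.trans h1.2⟩

theorem pvBord_down {t : List Char} {m k b : ℕ} (hm : m ≤ t.length)
    (hk : pvBord t m k) (hb : pvBord t m b) (hlt : b < k) : pvBord t k b := by
  refine ⟨hlt, suffix_of_suffix_le hb.2 hk.2 ?_⟩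
  have := hk.1; have := hb.1
  simp only [List.length_take]
  omega

-- extending a border by one matching character
theorem pvBord_succ_iff (t : List Char) (m b : ℕ) (hm : m < t.length) (d : Char) :
    pvBord t (m+1) (b+1) ↔ pvBord t m b ∧ t.getD b d = t.getD m d := by
  constructor
  · rintro ⟨h1, h2⟩
    have hb : b < m := by omega
    have hbl : b < t.length := by omega
    rw [List.take_succ, List.take_succ, List.getElem?_eq_getElem hbl,
        List.getElem?_eq_getElem hm] at h2
    simp only [Option.toList_some] at h2
    have h3 := List.reverse_prefix.mpr h2
    simp only [List.reverse_append, List.reverse_cons, List.reverse_nil, List.nil_append,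
      List.cons_append] at h3
    rw [List.cons_prefix_cons] at h3
    obtain ⟨hc, hp⟩ := h3
    refine ⟨⟨hb, List.reverse_prefix.mp hp⟩, ?_⟩
    rw [List.getD_eq_getElem?_getD, List.getD_eq_getElem?_getD,
        List.getElem?_eq_getElem hbl, List.getElem?_eq_getElem hm]
    simpa using hc
  · rintro ⟨⟨hb, hs⟩, hc⟩
    have hbl : b < t.length := by omega
    refine ⟨by omega, ?_⟩
    rw [List.take_succ, List.take_succ, List.getElem?_eq_getElem hbl,
        List.getElem?_eq_getElem hm]
    simp only [Option.toList_some]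
    rw [← List.reverse_prefix]
    simp only [List.reverse_append, List.reverse_cons, List.reverse_nil, List.nil_append,
      List.cons_append]
    rw [List.cons_prefix_cons]
    refine ⟨?_, List.reverse_prefix.mpr hs⟩
    rw [List.getD_eq_getElem?_getD, List.getD_eq_getElem?_getD,
        List.getElem?_eq_getElem hbl, List.getElem?_eq_getElem hm] at hc
    simpa using hc

-- the fall-back while loop: lands on a chain element whose next character matches (or 0)
theorem kmpFall_spec (t : List Char) (pi : List Nat) (cq : Char) (m : ℕ)
    (hpi : ∀ i, i < m → pi.getD i 0 = pvPi t (i+1)) (hm : m ≤ t.length) :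
    ∀ fuel k, k ≤ fuel → (k = 0 ∨ pvBord t m k) →
    (∀ b, pvBord t m b → t.getD b (Char.ofNat 0) = cq → b ≤ k) →
    ((kmpFall t pi cq fuel k = 0 ∨ pvBord t m (kmpFall t pi cq fuel k)) ∧
     (∀ b, pvBord t m b → t.getD b (Char.ofNat 0) = cq → b ≤ kmpFall t pi cq fuel k) ∧
     (t.getD (kmpFall t pi cq fuel k) (Char.ofNat 0) ≠ cq → kmpFall t pi cq fuel k = 0)) := by
  intro fuel
  induction fuel with
  | zero =>
    intro k hk h0 hmax
    have : k = 0 := by omega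
    subst this
    exact ⟨Or.inl rfl, hmax, fun _ => rfl⟩
  | succ f ih =>
    intro k hk h0 hmax
    by_cases hcond : k ≠ 0 ∧ t.getD k (Char.ofNat 0) ≠ cq
    · rw [show kmpFall t pi cq (f+1) k = kmpFall t pi cq f (pi.getD (k-1) 0) by
        simp only [kmpFall]; rw [if_pos hcond]]
      obtain ⟨hk0, hkc⟩ := hcond
      have hbk : pvBord t m k := h0.resolve_left hk0
      have hk1 : 1 ≤ k := by omega
      have hkm : k < m := hbk.1
      have hpik : pi.getD (k-1) 0 = pvPi t k := by
        have := hpi (k-1) (by omega)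
        rwa [show k - 1 + 1 = k by omega] at this
      rw [hpik]
      refine ih (pvPi t k) (by have := pvPi_lt t hk1; omega)
        (Or.inr (pvBord_trans hbk (pvPi_bord t hk1))) ?_
      intro b hb hbc
      have hble : b ≤ k := hmax b hb hbc
      have hbne : b ≠ k := fun h => hkc (h ▸ hbc)
      exact le_pvPi t (pvBord_down hm hbk hb (by omega))
    · rw [show kmpFall t pi cq (f+1) k = k by simp only [kmpFall]; rw [if_neg hcond]]
      push_neg at hcond
      refine ⟨h0, hmax, fun hne => ?_⟩
      by_cases hk0 : k = 0
      · exact hk0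
      · exact absurd (hcond hk0) hne

-- one iteration of the prefix-function loop computes the next prefix-function value
theorem kmpStep_pi (t : List Char) (pi : List Nat) (m : ℕ) (hm1 : 1 ≤ m) (hm : m < t.length)
    (hpi : ∀ i, i < m → pi.getD i 0 = pvPi t (i+1)) :
    (if t.getD m (Char.ofNat 0) = t.getD (kmpFall t pi (t.getD m (Char.ofNat 0)) (pvPi t m) (pvPi t m)) (Char.ofNat 0)
      then kmpFall t pi (t.getD m (Char.ofNat 0)) (pvPi t m) (pvPi t m) + 1
      else kmpFall t pi (t.getD m (Char.ofNat 0)) (pvPi t m) (pvPi t m)) = pvPi t (m+1) := by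
  set cq := t.getD m (Char.ofNat 0) with hcq
  obtain ⟨C1, C2, C3⟩ :=
    kmpFall_spec t pi cq m hpi (by omega) (pvPi t m) (pvPi t m) (le_refl _)
      (Or.inr (pvPi_bord t hm1)) (fun b hb _ => le_pvPi t hb)
  set r := kmpFall t pi cq (pvPi t m) (pvPi t m) with hr
  by_cases hceq : cq = t.getD r (Char.ofNat 0)
  · rw [if_pos hceq]
    have hBr : pvBord t (m+1) (r+1) := by
      rw [pvBord_succ_iff t m r hm (Char.ofNat 0)]
      exact ⟨C1.elim (fun h0 => h0 ▸ pvBord_zero t hm1) id, hceq.symm⟩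
    refine le_antisymm (le_pvPi t hBr) ?_
    rcases hp : pvPi t (m+1) with _ | b
    · omega
    · have hBp : pvBord t (m+1) (b+1) := hp ▸ pvPi_bord t (by omega)
      rw [pvBord_succ_iff t m b hm (Char.ofNat 0)] at hBp
      have := C2 b hBp.1 hBp.2
      omega
  · rw [if_neg hceq]
    have hr0 : r = 0 := C3 (fun h => hceq h.symm)
    rcases hp : pvPi t (m+1) with _ | b
    · omega
    · exfalso
      have hBp : pvBord t (m+1) (b+1) := hp ▸ pvPi_bord t (by omega)
      rw [pvBord_succ_iff t m b hm (Char.ofNat 0)] at hBp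
      have hble := C2 b hBp.1 hBp.2
      have hb0 : b = 0 := by omega
      subst hb0
      exact hceq (by rw [hr0]; exact hBp.2.symm)

-- the fold invariant: after processing q = 1..s-1 the state is ([pvPi 1, …, pvPi s], pvPi s)
theorem buildPi_inv (t : List Char) :
    ∀ s, 1 ≤ s → s ≤ t.length →
    (((List.range' 1 (s-1)).foldl (kmpStep t) ([0], 0)).1.length = s ∧
     (∀ i, i < s → ((List.range' 1 (s-1)).foldl (kmpStep t) ([0], 0)).1.getD i 0 = pvPi t (i+1)) ∧
     ((List.range' 1 (s-1)).foldl (kmpStep t) ([0], 0)).2 = pvPi t s) := by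
  intro s
  induction s with
  | zero => intro h; omega
  | succ s ih =>
    intro _ hlen
    by_cases hs : s = 0
    · subst hs
      refine ⟨rfl, ?_, rfl⟩
      intro i hi
      have : i = 0 := by omega
      subst this
      rfl
    · have hs1 : 1 ≤ s := by omega
      obtain ⟨ih1, ih2, ih3⟩ := ih hs1 (by omega)
      have hrange : List.range' 1 (s+1-1) = List.range' 1 (s-1) ++ [s] := by
        have h1 : s + 1 - 1 = (s - 1) + 1 := by omega
        rw [h1, List.range'_concat]
        congr 1
        simp
        omega
      rw [hrange, List.foldl_append, List.foldl_cons, List.foldl_nil]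
      set st := (List.range' 1 (s-1)).foldl (kmpStep t) (([0], 0) : List Nat × Nat) with hst
      have hstep : kmpStep t st s = (st.1 ++ [pvPi t (s+1)], pvPi t (s+1)) := by
        unfold kmpStep
        dsimp only
        rw [ih3]
        rw [kmpStep_pi t st.1 s hs1 (by omega) ih2]
      rw [hstep]
      refine ⟨by simp [ih1], ?_, rfl⟩
      intro i hi
      rcases Nat.lt_or_ge i s with hlt | hge
      · rw [List.getD_eq_getElem?_getD, List.getElem?_append_left (by omega),
            ← List.getD_eq_getElem?_getD]
        exact ih2 i hlt
      · have : i = s := by omega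
        subst this
        rw [List.getD_eq_getElem?_getD, List.getElem?_append_right (by omega)]
        simp [ih1]

-- ---- B-side: the chain walk returns the smallest admissible border ----
-- pvOv: i is a valid overlap length as a border of t below min(l1, l2)
def pvOv (t : List Char) (mn b : ℕ) : Prop := 1 ≤ b ∧ b < mn ∧ pvBord t t.length b

theorem chainLoop_spec (t : List Char) (pi : List Nat) (mn : ℕ)
    (hpi : ∀ i, i < t.length → pi.getD i 0 = pvPi t (i+1)) :
    ∀ fuel k ans, k ≤ fuel → (k = 0 ∨ pvBord t t.length k) →
    ((∃ b, pvOv t mn b ∧ b ≤ k) →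
       (pvOv t mn (chainLoop pi mn fuel k ans) ∧ chainLoop pi mn fuel k ans ≤ k ∧
        ∀ b, pvOv t mn b → b ≤ k → chainLoop pi mn fuel k ans ≤ b)) ∧
    ((¬ ∃ b, pvOv t mn b ∧ b ≤ k) → chainLoop pi mn fuel k ans = ans) := by
  intro fuel
  induction fuel with
  | zero =>
    intro k ans hk _
    have : k = 0 := by omega
    subst this
    constructor
    · rintro ⟨b, hb, hble⟩
      exact absurd hb.1 (by omega)
    · intro _; rfl
  | succ f ih =>
    intro k ans hk h0
    by_cases hk0 : k = 0
    · subst hk0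
      rw [show chainLoop pi mn (f+1) 0 ans = ans by simp [chainLoop]]
      constructor
      · rintro ⟨b, hb, hble⟩
        exact absurd hb.1 (by omega)
      · intro _; rfl
    · have hbk : pvBord t t.length k := h0.resolve_left hk0
      have hk1 : 1 ≤ k := by omega
      have hkn : k < t.length := hbk.1
      have hpik : pi.getD (k-1) 0 = pvPi t k := by
        have := hpi (k-1) (by omega)
        rwa [show k - 1 + 1 = k by omega] at this
      rw [show chainLoop pi mn (f+1) k ans
            = chainLoop pi mn f (pi.getD (k-1) 0) (if k < mn then k else ans) by
          simp only [chainLoop]; rw [if_pos hk0]]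
      rw [hpik]
      have hstep := ih (pvPi t k) (if k < mn then k else ans)
        (by have := pvPi_lt t hk1; omega)
        (Or.inr (pvBord_trans hbk (pvPi_bord t hk1)))
      have hdown : ∀ b, pvOv t mn b → b ≤ k → b ≠ k → b ≤ pvPi t k := by
        intro b hb hble hbne
        exact le_pvPi t (pvBord_down (le_refl _) hbk hb.2.2 (by omega))
      constructor
      · rintro ⟨b, hb, hble⟩
        by_cases hEx : ∃ b', pvOv t mn b' ∧ b' ≤ pvPi t k
        · obtain ⟨hOv, hle, hmin⟩ := hstep.1 hEx
          refine ⟨hOv, by have := pvPi_lt t hk1; omega, ?_⟩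
          intro b' hb' hble'
          by_cases hbe : b' = k
          · have := pvPi_lt t hk1; omega
          · exact hmin b' hb' (hdown b' hb' hble' hbe)
        · have hbek : b = k := by
            by_contra hne
            exact hEx ⟨b, hb, hdown b hb hble hne⟩
          subst hbek
          have hans : (if b < mn then b else ans) = b := if_pos hb.2.1
          rw [hstep.2 hEx, hans]
          refine ⟨hb, le_refl _, ?_⟩
          intro b' hb' hble'
          by_cases hbe : b' = b
          · omega
          · exact absurd ⟨b', hb', hdown b' hb' hble' hbe⟩ hEx
      · intro hnEx
        have hnk : ¬ pvOv t mn k := fun h => hnEx ⟨k, h, le_refl _⟩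
        have hkm : ¬ k < mn := fun h => hnk ⟨hk1, h, hbk⟩
        have hnEx' : ¬ ∃ b, pvOv t mn b ∧ b ≤ pvPi t k := by
          rintro ⟨b, hb, hble⟩
          exact hnEx ⟨b, hb, by have := pvPi_lt t hk1; omega⟩
        rw [hstep.2 hnEx', if_neg hkm]

-- ---- translating borders of t = str2 ++ '\x00' ++ str1 into overlaps ----
theorem take_t_eq (str1 str2 : String) (i : ℕ) (hi : i ≤ str2.toList.length) :
    (str2.toList ++ Char.ofNat 0 :: str1.toList).take i = str2.toList.take i :=
  List.take_append_of_le_length hi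

theorem suffix_t_iff (str1 str2 : String) (x : List Char) (hx : x.length ≤ str1.toList.length) :
    x <:+ (str2.toList ++ Char.ofNat 0 :: str1.toList) ↔ x <:+ str1.toList := by
  have hT : str2.toList ++ Char.ofNat 0 :: str1.toList
      = (str2.toList ++ [Char.ofNat 0]) ++ str1.toList := by simp
  rw [hT]
  constructor
  · intro h
    have h' := List.reverse_prefix.mpr h
    rw [List.reverse_append] at h'
    have hx' := List.prefix_iff_eq_take.mp h'
    rw [List.length_reverse,
        List.take_append_of_le_length (by rw [List.length_reverse]; exact hx)] at hx'
    have hpre : x.reverse <+: str1.toList.reverse := by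
      rw [hx']; exact List.take_prefix _ _
    exact List.reverse_prefix.mp hpre
  · intro h
    exact h.trans (List.suffix_append _ _)

theorem bord_iff_overlap (str1 str2 : String) (i : ℕ) (h1 : 1 ≤ i)
    (h2 : i < min str1.toList.length str2.toList.length) :
    pvBord (str2.toList ++ Char.ofNat 0 :: str1.toList)
        (str2.toList ++ Char.ofNat 0 :: str1.toList).length i
      ↔ str1.toList.drop (str1.toList.length - i) <+: str2.toList := by
  set t := str2.toList ++ Char.ofNat 0 :: str1.toList with ht
  have hn : t.length = str2.toList.length + 1 + str1.toList.length := by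
    rw [ht, List.length_append, List.length_cons]; omega
  have hil2 : i ≤ str2.toList.length := by omega
  have hil1 : i ≤ str1.toList.length := by omega
  have htake : (str2.toList.take i).length = i := by
    rw [List.length_take]; omega
  constructor
  · rintro ⟨_, hs⟩
    rw [List.take_length] at hs
    rw [take_t_eq str1 str2 i hil2] at hs
    rw [suffix_t_iff str1 str2 _ (by omega)] at hs
    have heq := List.suffix_iff_eq_drop.mp hs
    rw [htake] at heq
    rw [← heq]
    exact List.take_prefix _ _
  · intro hp
    refine ⟨by omega, ?_⟩
    rw [List.take_length, take_t_eq str1 str2 i hil2,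
        suffix_t_iff str1 str2 _ (by omega)]
    have heq := List.prefix_iff_eq_take.mp hp
    rw [List.length_drop] at heq
    rw [show str1.toList.length - (str1.toList.length - i) = i by omega] at heq
    rw [← heq]
    exact List.drop_suffix _ _

theorem pvOv_iff_pvQ (str1 str2 : String) (i : ℕ) :
    pvOv (str2.toList ++ Char.ofNat 0 :: str1.toList)
        (min str1.toList.length str2.toList.length) i
      ↔ (1 ≤ i ∧ i ≤ str1.toList.length ∧ pvQ str1 str2 (str1.toList.length - i)) := by
  constructor
  · rintro ⟨hi1, hi2, hb⟩
    have := (bord_iff_overlap str1 str2 i hi1 hi2).mp hb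
    refine ⟨hi1, by omega, ?_⟩
    unfold pvQ pvLo
    exact ⟨by omega, by omega, this⟩
  · rintro ⟨hi1, hil, hq⟩
    obtain ⟨hlo, hlt, hp⟩ := hq
    unfold pvLo at hlo
    have hi2 : i < min str1.toList.length str2.toList.length := by omega
    exact ⟨hi1, hi2, (bord_iff_overlap str1 str2 i hi1 hi2).mpr hp⟩

-- B computes pvTarget
theorem b_eq_target (str1 str2 : String) : collide_checker_alt str1 str2 = pvTarget str1 str2 := by
  unfold collide_checker_alt
  simp only []
  by_cases h0 : PySem.Str.len str1 = 0 ∨ PySem.Str.len str2 = 0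
  · rw [if_pos h0]
    rw [PySem.Str.len_eq, PySem.Str.len_eq] at h0
    rw [pvTarget_of_none ?_]
    intro q hq
    obtain ⟨hb1, hb2, _⟩ := hq
    unfold pvLo at hb1
    rcases h0 with h0 | h0 <;> omega
  · rw [if_neg h0]
    rw [PySem.Str.len_eq, PySem.Str.len_eq] at h0
    have hl1 : 1 ≤ str1.toList.length := by omega
    have hl2 : 1 ≤ str2.toList.length := by
      rcases Nat.eq_zero_or_pos str2.toList.length with h | h
      · exact absurd (Or.inr (by omega)) h0
      · omega
    set t := str2.toList ++ Char.ofNat 0 :: str1.toList with ht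
    have hn : t.length = str2.toList.length + 1 + str1.toList.length := by
      rw [ht, List.length_append, List.length_cons]; omega
    have hn1 : 1 ≤ t.length := by omega
    obtain ⟨hlen, hvals, _⟩ := buildPi_inv t t.length hn1 (le_refl _)
    have hpi : ∀ i, i < t.length → (buildPi t).getD i 0 = pvPi t (i+1) := by
      intro i hi
      unfold buildPi
      exact hvals i hi
    have hk0 : (buildPi t).getD (t.length - 1) 0 = pvPi t t.length := by
      rw [hpi (t.length - 1) (by omega), show t.length - 1 + 1 = t.length by omega]
    rw [hk0]
    set mn := min str1.toList.length str2.toList.length with hmn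
    have hchain := chainLoop_spec t (buildPi t) mn hpi (pvPi t t.length) (pvPi t t.length) 0
      (le_refl _) (Or.inr (pvPi_bord t hn1))
    by_cases hEx : ∃ b, pvOv t mn b
    · obtain ⟨b0, hb0⟩ := hEx
      have hEx' : ∃ b, pvOv t mn b ∧ b ≤ pvPi t t.length :=
        ⟨b0, hb0, le_pvPi t hb0.2.2⟩
      obtain ⟨hOvr, _, hmin⟩ := hchain.1 hEx'
      set r := chainLoop (buildPi t) mn (pvPi t t.length) (pvPi t t.length) 0 with hrdef
      obtain ⟨hr1, hrl, hrq⟩ := (pvOv_iff_pvQ str1 str2 r).mp hOvr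
      rw [pvTarget_of_max (str1.toList.length - r) hrq ?_]
      · omega
      · intro q' hgt hq'
        have hl : q' < str1.toList.length := hq'.2.1
        set b' := str1.toList.length - q' with hb'
        have hOvb' : pvOv t mn b' := by
          rw [pvOv_iff_pvQ str1 str2 b']
          refine ⟨by omega, by omega, ?_⟩
          rw [show str1.toList.length - b' = q' by omega]
          exact hq'
        have := hmin b' hOvb' (le_pvPi t hOvb'.2.2)
        omega
    · rw [hchain.2 (fun ⟨b, hb, _⟩ => hEx ⟨b, hb⟩)]
      rw [pvTarget_of_none ?_]
      · rfl
      · intro q hq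
        have hl : q < str1.toList.length := hq.2.1
        refine hEx ⟨str1.toList.length - q, ?_⟩
        rw [pvOv_iff_pvQ str1 str2 _]
        refine ⟨by omega, by omega, ?_⟩
        rw [show str1.toList.length - (str1.toList.length - q) = q by omega]
        exact hq

-- ===== VERDICT (by name: the statement is the Claim_ definition above) =====
theorem collide_checker_spec : Claim_equal_collide_checker := by
  intro str1 str2 _
  show collide_checker str1 str2 = collide_checker_alt str1 str2
  rw [a_eq_target, b_eq_target]
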